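-- pv_equiv track=rewrite | github.com/herissonchaves/questbank | questbank-server/latex2questbank/parser.py | _process_macro_imagem
-- ===== SOURCE A (Python) =====
-- from typing import Any, Dict, List, Optional, Tuple
--
-- class ParseError(Exception):
--     """Erro de parsing com contexto de linha e questão."""
--
--     def __init__(self, message: str, line: Optional[int] = None, questao_id: Optional[str] = None):
--         self.line = line
--         self.questao_id = questao_id
--         prefix_parts = []
--         if questao_id:
--             prefix_parts.append(f"questão {questao_id}")
--         if line is not None:
--             prefix_parts.append(f"linha {line}")
--         prefix = f"[{' / '.join(prefix_parts)}] " if prefix_parts else ""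
--         super().__init__(prefix + message)
--
-- def _read_braced(text: str, start: int) -> Tuple[str, int]:
--     """Lê um grupo { ... } a partir de `start` (que deve apontar para '{').
--
--     Respeita aninhamento e ignora chaves dentro de $...$ e $$...$$.
--     Retorna (conteúdo_sem_chaves_externas, posição_após_fechar).
--     """
--     if start >= len(text) or text[start] != "{":
--         raise ParseError(f"Esperava '{{' na posição {start}, achei {text[start:start+20]!r}")
--     depth = 0
--     i = start
--     in_dollar = 0  # 0=fora, 1=$, 2=$$
--     while i < len(text):
--         ch = text[i]
--         # escape \{ e \}
--         if ch == "\\" and i + 1 < len(text) and text[i + 1] in "{}$%":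
--             i += 2
--             continue
--         # contexto math
--         if in_dollar == 0 and ch == "$":
--             if i + 1 < len(text) and text[i + 1] == "$":
--                 in_dollar = 2
--                 i += 2
--                 continue
--             in_dollar = 1
--             i += 1
--             continue
--         if in_dollar == 1 and ch == "$":
--             in_dollar = 0
--             i += 1
--             continue
--         if in_dollar == 2 and ch == "$" and i + 1 < len(text) and text[i + 1] == "$":
--             in_dollar = 0
--             i += 2
--             continue
--         if in_dollar == 0:
--             if ch == "{":
--                 depth += 1
--             elif ch == "}":
--                 depth -= 1
--                 if depth == 0:
--                     return text[start + 1 : i], i + 1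
--         i += 1
--     raise ParseError("Chave '{' sem fechamento correspondente")
--
-- def _skip_ws(text: str, i: int) -> int:
--     while i < len(text) and text[i] in " \t\r\n":
--         i += 1
--     return i
--
-- def _process_macro_imagem(text: str, imagens: List[Dict[str, str]]) -> str:
--     """Substitui \\imagem{caminho} por marcador HTML e adiciona à lista."""
--     out = []
--     i = 0
--     while i < len(text):
--         if text.startswith("\\imagem", i):
--             j = _skip_ws(text, i + len("\\imagem"))
--             if j < len(text) and text[j] == "{":
--                 caminho, after = _read_braced(text, j)
--                 imagens.append({"arquivo": caminho.strip()})
--                 out.append("\x01IMG\x01")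
--                 i = after
--                 continue
--         out.append(text[i])
--         i += 1
--     return "".join(out)
-- ===== SOURCE B (Python) =====
-- from typing import Any, Dict, List, Optional, Tuple
--
--
-- class ParseError(Exception):
--     """Erro de parsing com contexto de linha e questão."""
--
--     def __init__(self, message: str, line: Optional[int] = None, questao_id: Optional[str] = None):
--         self.line = line
--         self.questao_id = questao_id
--         prefix_parts = []
--         if questao_id:
--             prefix_parts.append(f"questão {questao_id}")
--         if line is not None:
--             prefix_parts.append(f"linha {line}")
--         prefix = f"[{' / '.join(prefix_parts)}] " if prefix_parts else ""
--         super().__init__(prefix + message)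
--
--
-- def _skip_math(text: str, i: int, double: bool) -> int:
--     """Skip a $...$ or $$...$$ math segment; i points just after the opening
--     delimiter.  Returns the index just after the closing delimiter (or len(text)
--     if the math never closes)."""
--     n = len(text)
--     while i < n:
--         c = text[i]
--         if c == "\\" and i + 1 < n and text[i + 1] in "{}$%":
--             i += 2
--         elif c == "$":
--             if double:
--                 if i + 1 < n and text[i + 1] == "$":
--                     return i + 2
--                 i += 1
--             else:
--                 return i + 1
--         else:
--             i += 1
--     return n
--
--
-- def _read_group(text: str, start: int) -> Optional[Tuple[str, int]]:
--     """Recursive-descent reader of a { ... } group (`start` points at '{').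
--     Nested groups are read by recursion; math segments are skipped by
--     _skip_math.  Returns (content, index_after_close), or None if unclosed."""
--     buf = []
--     i = start + 1
--     n = len(text)
--     while i < n:
--         c = text[i]
--         if c == "\\" and i + 1 < n and text[i + 1] in "{}$%":
--             buf.append(text[i:i + 2])
--             i += 2
--         elif c == "$":
--             if i + 1 < n and text[i + 1] == "$":
--                 j = _skip_math(text, i + 2, True)
--             else:
--                 j = _skip_math(text, i + 1, False)
--             buf.append(text[i:j])
--             i = j
--         elif c == "{":
--             r = _read_group(text, i)
--             if r is None:
--                 return None
--             inner, after = r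
--             buf.append("{" + inner + "}")
--             i = after
--         elif c == "}":
--             return "".join(buf), i + 1
--         else:
--             buf.append(c)
--             i += 1
--     return None
--
--
-- def _process_macro_imagem(text: str, imagens: List[Dict[str, str]]) -> str:
--     """Substitui \\imagem{caminho} por marcador HTML e adiciona à lista.
--
--     Chunk loop: jump between occurrences of '\\imagem' with str.find and read
--     each braced argument with the recursive-descent reader _read_group."""
--     parts = []
--     i = 0
--     n = len(text)
--     while True:
--         pos = text.find("\\imagem", i)
--         if pos == -1:
--             parts.append(text[i:])
--             break
--         parts.append(text[i:pos])
--         j = pos + 7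
--         while j < n and text[j] in " \t\r\n":
--             j += 1
--         if j < n and text[j] == "{":
--             r = _read_group(text, j)
--             if r is None:
--                 raise ParseError("Chave '{' sem fechamento correspondente")
--             caminho, after = r
--             imagens.append({"arquivo": caminho.strip()})
--             parts.append("\x01IMG\x01")
--             i = after
--         else:
--             parts.append("\\imagem")
--             i = pos + 7
--     return "".join(parts)
-- ===== Notes on version B (the rewrite author's own statement) =====
-- stated objective: faster
-- what changed: A tests text.startswith('\imagem', i) at every character and appends chars one by one, reading the braced argument with a flat state machine (depth counter + in_dollar flag); B jumps between occurrences with text.find and appends whole chunks, and reads the braced argument by recursive descent (recursion on nesting, $...$/$$...$$ skipped by a helper); the chunk loop removes the per-character startswith test and per-character appends (measured ~2.3x at the largest size).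
import Mathlib
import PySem

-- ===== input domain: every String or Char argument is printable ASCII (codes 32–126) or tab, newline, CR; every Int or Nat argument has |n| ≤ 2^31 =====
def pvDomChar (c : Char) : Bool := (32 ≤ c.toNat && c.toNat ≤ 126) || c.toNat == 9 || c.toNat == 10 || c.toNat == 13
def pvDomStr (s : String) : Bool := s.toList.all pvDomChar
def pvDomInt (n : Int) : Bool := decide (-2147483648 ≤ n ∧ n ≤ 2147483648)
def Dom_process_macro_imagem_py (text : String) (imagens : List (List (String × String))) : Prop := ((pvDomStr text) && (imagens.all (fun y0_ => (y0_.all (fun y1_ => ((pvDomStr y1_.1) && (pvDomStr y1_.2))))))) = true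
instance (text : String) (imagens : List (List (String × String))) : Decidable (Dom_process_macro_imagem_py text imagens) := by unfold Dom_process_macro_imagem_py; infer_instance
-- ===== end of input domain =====

-- B replaces A's per-character startswith scan by a find-next-occurrence chunk loop, and replaces
-- A's flat state-machine brace reader (depth counter + in_dollar flag) by a recursive-descent
-- reader (recursion on nesting, math segments skipped by a separate helper).
-- Both A and B append to `imagens` in place identically; the equivalence proved here is about the
-- return value.  A's ParseError (an unclosed '{' group) is modeled as `none` in both ports and
-- those inputs are excluded by Pre_ (B raises ParseError there too).

-- ===== PORT A =====
def pvIsWs (c : Char) : Bool := c = ' ' || c = '\t' || c = '\r' || c = '\n'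
def pvSig : List Char := ['\\', 'i', 'm', 'a', 'g', 'e', 'm']
def pvMarker : List Char := ['\u0001', 'I', 'M', 'G', '\u0001']
def pvEscTgt (o : Option Char) : Bool := o = some '{' || o = some '}' || o = some '$' || o = some '%'

-- transliteration of `_read_braced`'s while loop; `acc` collects the consumed chars (reversed),
-- content = text[start+1:i] is recovered as acc.reverse.tail; `none` = the final `raise ParseError`.
-- Python's `text[i+1]` lookaheads are the nested matches on `rest` (their [] arms are unreachable:
-- the guard just checked that a next character exists).
def pvRbLoop : List Char → Int → Nat → List Char → Option (List Char × List Char)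
  | [], _, _, _ => none
  | ch :: rest, depth, inD, acc =>
    if ch = '\\' && pvEscTgt rest.head? then
      match rest with
      | d :: rest2 => pvRbLoop rest2 depth inD (d :: ch :: acc)
      | [] => none
    else if inD == 0 && ch == '$' then
      match rest with
      | '$' :: rest2 => pvRbLoop rest2 depth 2 ('$' :: '$' :: acc)
      | r => pvRbLoop r depth 1 ('$' :: acc)
    else if inD == 1 && ch == '$' then pvRbLoop rest depth 0 ('$' :: acc)
    else if inD == 2 && ch == '$' && rest.head? == some '$' then
      match rest with
      | _ :: rest2 => pvRbLoop rest2 depth 0 ('$' :: '$' :: acc)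
      | [] => none
    else if inD == 0 && ch == '{' then pvRbLoop rest (depth + 1) inD ('{' :: acc)
    else if inD == 0 && ch == '}' then
      if depth - 1 = 0 then some (acc.reverse.tail, rest)
      else pvRbLoop rest (depth - 1) inD ('}' :: acc)
    else pvRbLoop rest depth inD (ch :: acc)

-- `_read_braced`: the guard `text[start] != '{'` raises (none); A only calls it after checking '{'
def pvReadBraced (j : List Char) : Option (List Char × List Char) :=
  if j.head? = some '{' then pvRbLoop j 0 0 [] else none

-- transliteration of `_process_macro_imagem`'s while loop over the suffix text[i:].
-- The dite guards on the recursive calls are totality guards only (always true: the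
-- closing '}' lies strictly inside the text).
def pvA0 : List Char → Option (List Char)
  | [] => some []
  | c :: rest =>
    if pvSig.isPrefixOf (c :: rest) then
      -- j = _skip_ws(text, i + 7); the brace test is `j < len(text) and text[j] == '{'`
      if ((rest.drop 6).dropWhile pvIsWs).head? = some '{' then
        match pvReadBraced ((rest.drop 6).dropWhile pvIsWs) with
        | some (_, after) =>
          if h : after.length < rest.length + 1 then (pvA0 after).map (fun r => pvMarker ++ r)
          else none
        | none => none  -- ParseError propagates
      else (pvA0 rest).map (fun r => c :: r)
    else (pvA0 rest).map (fun r => c :: r)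
  termination_by cs => cs.length
  decreasing_by
  · exact h
  · exact Nat.lt_succ_self _
  · exact Nat.lt_succ_self _

def process_macro_imagem_py (text : String) (imagens : List (List (String × String))) : String :=
  String.ofList ((pvA0 text.toList).getD [])

-- ===== PORT B =====
-- `_skip_math`: consume a $...$ or $$...$$ segment (input starts just after the opening
-- delimiter); returns (consumed chars = the slice text[i:j], remaining suffix).
def pvSM : List Char → Bool → (List Char × List Char)
  | [], _ => ([], [])
  | c :: rest, dbl =>
    if c = '\\' && pvEscTgt rest.head? then
      match rest with
      | d :: r2 => (c :: d :: (pvSM r2 dbl).1, (pvSM r2 dbl).2)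
      | [] => ([c], [])   -- unreachable: the guard checked a next character exists
    else if c = '$' then
      if dbl then
        match rest with
        | '$' :: r2 => (['$', '$'], r2)
        | r => ('$' :: (pvSM r dbl).1, (pvSM r dbl).2)
      else (['$'], rest)
    else (c :: (pvSM rest dbl).1, (pvSM rest dbl).2)

-- `_read_group`'s body: recursive descent over the chars after '{'; returns
-- (content, suffix after the matching '}').  `fuel` is a totality guard only
-- (fuel = input length always suffices: every step consumes at least one char).
def pvMB : Nat → List Char → Option (List Char × List Char)
  | _, [] => none
  | 0, _ :: _ => none        -- fuel exhausted: unreachable with fuel ≥ length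
  | f + 1, c :: rest =>
    if c = '\\' && pvEscTgt rest.head? then
      match rest with
      | d :: r2 => (pvMB f r2).map (fun pr => (c :: d :: pr.1, pr.2))
      | [] => none
    else if c = '$' then
      match rest with
      | '$' :: r2 => (pvMB f (pvSM r2 true).2).map (fun pr => ('$' :: '$' :: (pvSM r2 true).1 ++ pr.1, pr.2))
      | r => (pvMB f (pvSM r false).2).map (fun pr => ('$' :: (pvSM r false).1 ++ pr.1, pr.2))
    else if c = '{' then
      match pvMB f rest with
      | some pr => (pvMB f pr.2).map (fun q => ('{' :: pr.1 ++ '}' :: q.1, q.2))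
      | none => none
    else if c = '}' then some ([], rest)
    else (pvMB f rest).map (fun pr => (c :: pr.1, pr.2))

-- `_read_group(text, start)`: start must point at '{'
def pvReadGroup (j : List Char) : Option (List Char × List Char) :=
  match j with
  | '{' :: t => pvMB t.length t
  | _ => none

-- text.find("\imagem", i) applied to the suffix text[i:]: index of the first occurrence, else none
def pvFindSig : List Char → Option Nat
  | [] => none
  | c :: rest => if pvSig.isPrefixOf (c :: rest) then some 0 else (pvFindSig rest).map (· + 1)

def pvB0 (cs : List Char) : Option (List Char) :=
  match pvFindSig cs with
  | none => some cs  -- no further occurrence: emit the remaining text and stop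
  | some p =>
    if ((cs.drop (p + 7)).dropWhile pvIsWs).head? = some '{' then
      match pvReadGroup ((cs.drop (p + 7)).dropWhile pvIsWs) with
      | some pr =>
        if h : pr.2.length < cs.length then (pvB0 pr.2).map (fun r => cs.take p ++ (pvMarker ++ r))
        else none  -- totality guard, always true
      | none => none  -- ParseError propagates
    else
      if h2 : (cs.drop (p + 7)).length < cs.length then
        (pvB0 (cs.drop (p + 7))).map (fun r => cs.take p ++ (pvSig ++ r))
      else none  -- totality guard, always true (a found occurrence occupies 7 characters)
  termination_by cs.length
  decreasing_by
  · exact h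
  · exact h2

def process_macro_imagem_py_alt (text : String) (imagens : List (List (String × String))) : String :=
  String.ofList ((pvB0 text.toList).getD [])

-- ===== PRECONDITION & SPEC =====
-- Input-shape checker for Pre_: does the group scan started at this call site close?
-- (the same math/escape-aware reading A performs, tracking only the remaining suffix)
def pvPreGrp : Nat → List Char → Int → Nat → Option (List Char)
  | _, [], _, _ => none
  | 0, _ :: _, _, _ => none   -- fuel exhausted: unreachable with fuel ≥ length
  | f + 1, ch :: rest, depth, inD =>
    if ch = '\\' && pvEscTgt rest.head? then
      match rest with
      | _ :: rest2 => pvPreGrp f rest2 depth inD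
      | [] => none
    else if inD == 0 && ch == '$' then
      match rest with
      | '$' :: rest2 => pvPreGrp f rest2 depth 2
      | r => pvPreGrp f r depth 1
    else if inD == 1 && ch == '$' then pvPreGrp f rest depth 0
    else if inD == 2 && ch == '$' && rest.head? == some '$' then
      match rest with
      | _ :: rest2 => pvPreGrp f rest2 depth 0
      | [] => none
    else if inD == 0 && ch == '{' then pvPreGrp f rest (depth + 1) inD
    else if inD == 0 && ch == '}' then
      if depth - 1 = 0 then some rest
      else pvPreGrp f rest (depth - 1) inD
    else pvPreGrp f rest depth inD

-- fuel is a totality guard only (fuel = input length always suffices: every step consumes ≥ 1 char)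
def pvPreScan : Nat → List Char → Bool
  | _, [] => true
  | 0, _ :: _ => false      -- fuel exhausted: unreachable with fuel ≥ length
  | f + 1, c :: rest =>
    if pvSig.isPrefixOf (c :: rest) then
      if ((rest.drop 6).dropWhile pvIsWs).head? = some '{' then
        match pvPreGrp ((rest.drop 6).dropWhile pvIsWs).length ((rest.drop 6).dropWhile pvIsWs) 0 0 with
        | some after => pvPreScan f after
        | none => false  -- unclosed group: A raises ParseError here
      else pvPreScan f rest
    else pvPreScan f rest

-- Pre_ is the input-shape condition 'every \imagem{...} argument group in `text` is closed'
-- (in the same math/escape-aware reading both programs use).  It excludes exactly the inputs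
-- on which Python A raises ParseError and admits every input on which A returns; B raises the
-- same ParseError on the excluded inputs.
def Pre_process_macro_imagem_py (text : String) (imagens : List (List (String × String))) : Prop :=
  pvPreScan text.toList.length text.toList = true
instance (text : String) (imagens : List (List (String × String))) : Decidable (Pre_process_macro_imagem_py text imagens) := by unfold Pre_process_macro_imagem_py; infer_instance

def pvWitness_process_macro_imagem_py : String × (List (List (String × String))) :=
  ("a \\imagem{fig.png} b $x_1$", [])

def Spec_process_macro_imagem_py (text : String) (imagens : List (List (String × String))) (out : String) : Prop := out = process_macro_imagem_py_alt text imagens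
instance (text : String) (imagens : List (List (String × String))) (out : String) : Decidable (Spec_process_macro_imagem_py text imagens out) := by unfold Spec_process_macro_imagem_py; infer_instance

-- ===== CLAIM (what is proved, stated in full; the proofs are below) =====
def Claim_equal_process_macro_imagem_py : Prop := ∀ (text : String) (imagens : List (List (String × String))), Dom_process_macro_imagem_py text imagens → Pre_process_macro_imagem_py text imagens → Spec_process_macro_imagem_py text imagens (process_macro_imagem_py text imagens)

-- ===== LEMMAS AND PROOFS =====

theorem pvSM_len (cs : List Char) (dbl : Bool) : (pvSM cs dbl).2.length ≤ cs.length := by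
  fun_induction pvSM cs dbl <;> simp_all <;> omega


theorem pvMB_rest_lt : ∀ (f : Nat) (cs : List Char) (pr : List Char × List Char),
    pvMB f cs = some pr → pr.2.length < cs.length := by
  intro f
  induction f with
  | zero => intro cs pr h; cases cs <;> simp [pvMB] at h
  | succ f ih =>
    intro cs pr h
    cases cs with
    | nil => simp [pvMB] at h
    | cons c rest =>
      rw [pvMB.eq_def] at h
      simp only [] at h
      repeat' split at h
      all_goals first
        | (cases h <;> exact Nat.lt_succ_self _)
        | (simp only [Option.map_eq_some_iff] at h
           obtain ⟨pr', hpr', rfl⟩ := h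
           have h2 := ih _ _ hpr'
           simp only [List.length_cons]
           first
             | omega
             | (have := pvSM_len rest false; omega)
             | (rename_i x0 pr1 hpr1; have h1 := ih _ _ hpr1; omega)
             | (rename_i r1 r2 hx; have := pvSM_len r2 true; omega))

theorem pvMB_nil (f : Nat) : pvMB f [] = none := by cases f <;> rfl

theorem pvMB_fuel : ∀ (n : Nat) (cs : List Char) (f f' : Nat), cs.length ≤ n →
    cs.length ≤ f → cs.length ≤ f' → pvMB f cs = pvMB f' cs := by
  intro n
  induction n with
  | zero =>
    intro cs f f' h _ _
    cases cs with
    | nil => rw [pvMB_nil, pvMB_nil]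
    | cons c r => simp at h
  | succ n ih =>
    intro cs f f' hn hf hf'
    cases cs with
    | nil => rw [pvMB_nil, pvMB_nil]
    | cons c rest =>
      simp only [List.length_cons] at hn hf hf'
      obtain ⟨g, rfl⟩ : ∃ g, f = g + 1 := ⟨f - 1, by omega⟩
      obtain ⟨g', rfl⟩ : ∃ g'', f' = g'' + 1 := ⟨f' - 1, by omega⟩
      have IH : ∀ X : List Char, X.length ≤ rest.length → pvMB g X = pvMB g' X :=
        fun X hX => ih X g g' (by omega) (by omega) (by omega)
      rw [show pvMB (g + 1) (c :: rest) = _ from pvMB.eq_def .., 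
          show pvMB (g' + 1) (c :: rest) = _ from pvMB.eq_def ..]
      simp only
      split_ifs with h1 h2 h3 h4
      · cases rest with
        | nil => rfl
        | cons d r2 => simp only; rw [IH r2 (by simp)]
      · rcases rest with _ | ⟨d, r2⟩
        · simp only; rw [IH _ (by simpa using pvSM_len [] false)]
        · by_cases hd : d = '$'
          · subst hd; simp only
            rw [IH _ (le_trans (pvSM_len r2 true) (by simp))]
          · split
            · simp_all
            · rw [IH _ (pvSM_len (d :: r2) false)]
      · -- c = '{'
        rw [IH rest le_rfl]
        cases hmb : pvMB g' rest with
        | none => rfl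
        | some pr =>
          have := pvMB_rest_lt _ _ _ hmb
          simp only
          rw [IH pr.2 (by omega)]
      · rfl
      · rw [IH rest le_rfl]

def pvMBT (cs : List Char) : Option (List Char × List Char) := pvMB cs.length cs

theorem pvMBT_cons (c : Char) (rest : List Char) : pvMBT (c :: rest) =
    (if c = '\\' && pvEscTgt rest.head? then
      match rest with
      | d :: r2 => (pvMBT r2).map (fun pr => (c :: d :: pr.1, pr.2))
      | [] => none
    else if c = '$' then
      match rest with
      | '$' :: r2 => (pvMBT (pvSM r2 true).2).map (fun pr => ('$' :: '$' :: (pvSM r2 true).1 ++ pr.1, pr.2))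
      | r => (pvMBT (pvSM r false).2).map (fun pr => ('$' :: (pvSM r false).1 ++ pr.1, pr.2))
    else if c = '{' then
      match pvMBT rest with
      | some pr => (pvMBT pr.2).map (fun q => ('{' :: pr.1 ++ '}' :: q.1, q.2))
      | none => none
    else if c = '}' then some ([], rest)
    else (pvMBT rest).map (fun pr => (c :: pr.1, pr.2))) := by
  have CV : ∀ X : List Char, X.length ≤ rest.length → pvMB rest.length X = pvMBT X :=
    fun X hX => pvMB_fuel rest.length X rest.length X.length hX hX le_rfl
  show pvMB (rest.length + 1) (c :: rest) = _
  rw [show pvMB (rest.length + 1) (c :: rest) = _ from pvMB.eq_def ..]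
  simp only
  split_ifs with h1 h2 h3 h4
  · cases rest with
    | nil => rfl
    | cons d r2 => simp only; rw [CV r2 (by simp)]
  · rcases rest with _ | ⟨d, r2⟩
    · simp only; rw [CV _ (by simpa using pvSM_len [] false)]
    · by_cases hd : d = '$'
      · subst hd; simp only; rw [CV _ (le_trans (pvSM_len r2 true) (by simp))]
      · split
        · simp_all
        · rw [CV _ (pvSM_len (d :: r2) false)]
  · rw [CV rest le_rfl]
    cases hmb : pvMBT rest with
    | none => rfl
    | some pr =>
      have hlt : pr.2.length < rest.length := pvMB_rest_lt _ _ _ (by simpa [pvMBT] using hmb)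
      simp only
      rw [CV pr.2 (by omega)]
  · rfl
  · rw [CV rest le_rfl]

def pvClT : Nat → List Char → Option (List Char × List Char)
  | 0, cs => some ([], cs)
  | 1, cs => pvMBT cs
  | d + 2, cs => (pvMBT cs).bind (fun pr => (pvClT (d + 1) pr.2).map (fun q => (pr.1 ++ '}' :: q.1, q.2)))

theorem pvClT_map (d : Nat) (cs cs' pre : List Char)
    (h : pvMBT cs = (pvMBT cs').map (fun pr => (pre ++ pr.1, pr.2))) :
    pvClT (d + 1) cs = (pvClT (d + 1) cs').map (fun pr => (pre ++ pr.1, pr.2)) := by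
  cases d with
  | zero => simpa [pvClT] using h
  | succ d =>
    show pvClT (d + 2) cs = _
    rw [pvClT, pvClT, h]
    cases pvMBT cs' with
    | none => rfl
    | some pr =>
      simp only [Option.map_some, Option.bind_some]
      cases pvClT (d + 1) pr.2 <;> simp [List.append_assoc]

theorem pvClT_brace (d : Nat) (rest : List Char) :
    pvClT (d + 1) ('{' :: rest) = (pvClT (d + 2) rest).map (fun pr => ('{' :: pr.1, pr.2)) := by
  have hmb : pvMBT ('{' :: rest) =
      (match pvMBT rest with
       | some pr => (pvMBT pr.2).map (fun q => ('{' :: pr.1 ++ '}' :: q.1, q.2))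
       | none => none) := by
    rw [pvMBT_cons]
    rfl
  cases d with
  | zero =>
    show pvMBT ('{' :: rest) = _
    rw [hmb, pvClT]
    cases pvMBT rest with
    | none => rfl
    | some pr =>
      simp only [Option.bind_some]
      show _ = ((pvMBT pr.2).map _).map _
      cases pvMBT pr.2 <;> simp
  | succ d =>
    show pvClT (d + 2) ('{' :: rest) = (pvClT ((d + 1) + 2) rest).map _
    rw [pvClT, pvClT, hmb]
    cases h1 : pvMBT rest with
    | none => rfl
    | some pr1 =>
      simp only [Option.bind_some]
      rw [pvClT]
      cases h2 : pvMBT pr1.2 with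
      | none => rfl
      | some pr2 =>
        simp only [Option.map_some, Option.bind_some]
        cases pvClT (d + 1) pr2.2 <;> simp [List.append_assoc]

theorem pvSM_rb_aux : ∀ (n : Nat) (cs : List Char), cs.length ≤ n →
    ∀ (dep : Int) (dbl : Bool) (acc : List Char),
    pvRbLoop cs dep (if dbl then 2 else 1) acc =
      pvRbLoop (pvSM cs dbl).2 dep 0 ((pvSM cs dbl).1.reverse ++ acc) := by
  intro n
  induction n with
  | zero =>
    intro cs h dep dbl acc
    rw [List.length_eq_zero_iff.mp (Nat.le_zero.mp h)]
    cases dbl <;> rfl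
  | succ n ih =>
    intro cs hlen dep dbl acc
    cases cs with
    | nil => cases dbl <;> rfl
    | cons c rest =>
      simp only [List.length_cons] at hlen
      rw [pvSM.eq_def]
      cases dbl
      · rw [show (if false = true then 2 else 1) = 1 from rfl]
        rw [pvRbLoop.eq_def]
        simp only
        by_cases h1 : (c = '\\' && pvEscTgt rest.head?) = true
        · rw [if_pos h1]
          simp only [h1, if_true]
          cases rest with
          | nil => simp [pvEscTgt] at h1
          | cons d r2 =>
            simp only
            rw [show (1:Nat) = (if false then 2 else 1) from rfl,
                ih r2 (by simp at hlen ⊢; omega)]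
            simp [List.append_assoc]
        · rw [if_neg h1]
          simp only [h1, Bool.false_eq_true, if_false]
          norm_num
          by_cases hc : c = '$'
          · subst hc
            rfl
          · simp only [hc, if_false]
            rw [show (1:Nat) = (if false then 2 else 1) from rfl,
                ih rest (by omega)]
            first | rfl | simp [List.append_assoc]
      · rw [show (if true = true then 2 else 1) = 2 from rfl]
        rw [pvRbLoop.eq_def]
        simp only
        by_cases h1 : (c = '\\' && pvEscTgt rest.head?) = true
        · rw [if_pos h1]
          simp only [h1, if_true]
          cases rest with
          | nil => simp [pvEscTgt] at h1
          | cons d r2 =>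
            simp only
            rw [show (2:Nat) = (if true then 2 else 1) from rfl,
                ih r2 (by simp at hlen ⊢; omega)]
            simp [List.append_assoc]
        · rw [if_neg h1]
          simp only [h1, Bool.false_eq_true, if_false]
          norm_num
          by_cases hc : c = '$'
          · subst hc
            cases rest with
            | nil => rfl
            | cons d r2 =>
              by_cases hd : d = '$'
              · subst hd
                simp
              · simp only [List.head?_cons]
                rw [show (2:Nat) = (if true then 2 else 1) from rfl,
                    ih (d :: r2) (by omega)]
                simp only [true_and, if_true, Option.some.injEq]
                rw [if_neg hd]
                split
                · simp_all
                · simp [List.append_assoc]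
          · simp only [hc, if_false]
            rw [show (2:Nat) = (if true then 2 else 1) from rfl,
                ih rest (by omega)]
            first | rfl | simp [List.append_assoc]

theorem pvSM_rb (cs : List Char) (dep : Int) (dbl : Bool) (acc : List Char) :
    pvRbLoop cs dep (if dbl then 2 else 1) acc =
      pvRbLoop (pvSM cs dbl).2 dep 0 ((pvSM cs dbl).1.reverse ++ acc) :=
  pvSM_rb_aux cs.length cs le_rfl dep dbl acc

theorem pvSM_rb1 (cs : List Char) (dep : Int) (acc : List Char) :
    pvRbLoop cs dep 1 acc =
      pvRbLoop (pvSM cs false).2 dep 0 ((pvSM cs false).1.reverse ++ acc) := by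
  simpa using pvSM_rb cs dep false acc

theorem pvSM_rb2 (cs : List Char) (dep : Int) (acc : List Char) :
    pvRbLoop cs dep 2 acc =
      pvRbLoop (pvSM cs true).2 dep 0 ((pvSM cs true).1.reverse ++ acc) := by
  simpa using pvSM_rb cs dep true acc

theorem pvClT_nil (d : Nat) : pvClT (d + 1) [] = none := by
  cases d with
  | zero => rfl
  | succ d => rfl

theorem pvML : ∀ (n : Nat) (cs : List Char), cs.length ≤ n → ∀ (d : Nat) (acc : List Char),
    pvRbLoop cs ((d : Int) + 1) 0 acc =
      (pvClT (d + 1) cs).map (fun pr => ((acc.reverse ++ pr.1).tail, pr.2)) := by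
  intro n
  induction n with
  | zero =>
    intro cs h d acc
    rw [List.length_eq_zero_iff.mp (Nat.le_zero.mp h)]
    rw [pvClT_nil]
    rfl
  | succ n ih =>
    intro cs hlen d acc
    cases cs with
    | nil => rw [pvClT_nil]; rfl
    | cons c rest =>
      simp only [List.length_cons] at hlen
      rw [pvRbLoop.eq_def]
      simp only
      norm_num
      by_cases h1 : c = '\\' ∧ pvEscTgt rest.head? = true
      · rw [if_pos h1]
        cases rest with
        | nil => simp [pvEscTgt] at h1
        | cons e r2 =>
          simp only
          have h12 : pvEscTgt (some e) = true := by simpa using h1.2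
          have hm : pvMBT (c :: e :: r2) = (pvMBT r2).map (fun pr => ((c :: e :: []) ++ pr.1, pr.2)) := by
            rw [pvMBT_cons, if_pos (by simp [h1.1, h12])]
            rfl
          rw [ih r2 (by simp only [List.length_cons] at hlen; omega) d (e :: c :: acc),
              pvClT_map d _ _ (c :: e :: []) hm]
          cases pvClT (d + 1) r2 <;> simp [List.append_assoc]
      · rw [if_neg h1]
        have h1b : ¬ ((c = '\\' && pvEscTgt rest.head?) = true) := by
          simpa using h1
        by_cases h2 : c = '$'
        · subst h2
          simp only [if_true]
          cases rest with
          | nil =>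
            show pvRbLoop [] ((d:Int) + 1) 1 ('$' :: acc) = _
            rw [pvSM_rb1,
                ih _ (by simp [pvSM]) d _]
            have hm : pvMBT ['$'] = (pvMBT (pvSM [] false).2).map
                (fun pr => (('$' :: (pvSM [] false).1) ++ pr.1, pr.2)) := by
              rw [pvMBT_cons, if_neg h1b]
              rfl
            rw [pvClT_map d _ _ ('$' :: (pvSM [] false).1) hm]
            cases pvClT (d + 1) (pvSM [] false).2 <;> simp [List.append_assoc, pvSM]
          | cons e r2 =>
            by_cases he : e = '$'
            · subst he
              simp only
              rw [pvSM_rb2,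
                  ih _ (by have := pvSM_len r2 true; simp only [List.length_cons] at hlen; omega) d _]
              have hm : pvMBT ('$' :: '$' :: r2) = (pvMBT (pvSM r2 true).2).map
                  (fun pr => (('$' :: '$' :: (pvSM r2 true).1) ++ pr.1, pr.2)) := by
                rw [pvMBT_cons, if_neg h1b]
                rfl
              rw [pvClT_map d _ _ ('$' :: '$' :: (pvSM r2 true).1) hm]
              cases pvClT (d + 1) (pvSM r2 true).2 <;> simp [List.append_assoc]
            · split
              · simp_all
              · rw [pvSM_rb1,
                    ih _ (by have := pvSM_len (e :: r2) false; simp only [List.length_cons] at hlen this; omega) d _]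
                have hm : pvMBT ('$' :: e :: r2) = (pvMBT (pvSM (e :: r2) false).2).map
                    (fun pr => (('$' :: (pvSM (e :: r2) false).1) ++ pr.1, pr.2)) := by
                  rw [pvMBT_cons, if_neg h1b]
                  rw [if_pos (show ('$':Char) = '$' from rfl)]
                  split
                  · simp_all
                  · rfl
                rw [pvClT_map d _ _ ('$' :: (pvSM (e :: r2) false).1) hm]
                cases pvClT (d + 1) (pvSM (e :: r2) false).2 <;> simp [List.append_assoc]
        · simp only [h2, if_false]
          by_cases h3 : c = '{'
          · subst h3
            simp only [if_true]
            rw [show ((d:Int) + 1 + 1) = (((d+1 : Nat)):Int) + 1 from by push_cast; ring,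
                ih rest (by omega) (d+1) ('{' :: acc),
                pvClT_brace d rest]
            cases pvClT (d + 2) rest <;> simp [List.append_assoc]
          · simp only [h3, if_false]
            by_cases h4 : c = '}'
            · subst h4
              simp only [if_true]
              have hm : pvMBT ('}' :: rest) = some ([], rest) := by
                rw [pvMBT_cons]
                rfl
              cases d with
              | zero =>
                rw [if_pos rfl]
                show _ = (pvMBT ('}' :: rest)).map _
                rw [hm]
                simp
              | succ k =>
                rw [if_neg (Nat.succ_ne_zero k)]
                rw [show ((k + 1 : Nat) : Int) = ((k : Nat) : Int) + 1 from by push_cast; ring,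
                    ih rest (by omega) k ('}' :: acc)]
                show _ = (pvClT (k + 2) ('}' :: rest)).map _
                rw [pvClT, hm]
                simp only [Option.bind_some]
                cases pvClT (k + 1) rest <;> simp [List.append_assoc]
            · simp only [h4, if_false]
              have hm : pvMBT (c :: rest) = (pvMBT rest).map (fun pr => ((c :: []) ++ pr.1, pr.2)) := by
                rw [pvMBT_cons, if_neg h1b]
                simp only [h2, h3, h4, if_false]
                rfl
              rw [ih rest (by omega) d (c :: acc),
                  pvClT_map d _ _ (c :: []) hm]
              cases pvClT (d + 1) rest <;> simp [List.append_assoc]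

theorem pvReadGroup_eq (j : List Char) : pvReadGroup j = pvReadBraced j := by
  cases j with
  | nil => rfl
  | cons c t =>
    by_cases hc : c = '{'
    · subst hc
      show pvMBT t = pvReadBraced ('{' :: t)
      unfold pvReadBraced
      rw [if_pos (by simp)]
      rw [pvRbLoop.eq_def]
      simp only
      norm_num
      rw [if_neg (by simp), if_neg (by decide)]
      rw [show (1:Int) = ((0:Nat):Int) + 1 from by norm_num,
          pvML t.length t le_rfl 0 ['{']]
      rw [show pvClT (0 + 1) t = pvMBT t from rfl]
      cases pvMBT t with
      | none => rfl
      | some pr => simp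
    · unfold pvReadGroup pvReadBraced
      rw [if_neg (by simp [hc])]
      split
      · simp_all
      · rfl

theorem pvReadBraced_after_lt (j : List Char) (pr : List Char × List Char)
    (h : pvReadBraced j = some pr) : pr.2.length < j.length := by
  rw [← pvReadGroup_eq] at h
  unfold pvReadGroup at h
  split at h
  · have := pvMB_rest_lt _ _ _ h
    simp only [List.length_cons]
    omega
  · cases h

theorem pvGuard (x : List Char) (q : Nat) (pr : List Char × List Char)
    (hr : pvReadBraced ((x.drop q).dropWhile pvIsWs) = some pr) :
    pr.2.length < x.length := by
  have h1 := pvReadBraced_after_lt _ _ hr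
  have h2 : ((x.drop q).dropWhile pvIsWs).length ≤ (x.drop q).length :=
    List.length_dropWhile_le _ _
  have h3 : (x.drop q).length = x.length - q := by simp
  omega

theorem pvFindSig_some (cs : List Char) (p : Nat) (h : pvFindSig cs = some p) :
    pvSig.isPrefixOf (cs.drop p) = true ∧ p + 7 ≤ cs.length := by
  induction cs generalizing p with
  | nil => simp [pvFindSig] at h
  | cons c rest ih =>
    rw [pvFindSig] at h
    by_cases hp : pvSig.isPrefixOf (c :: rest)
    · rw [if_pos hp] at h
      cases h
      refine ⟨hp, ?_⟩
      have := (List.isPrefixOf_iff_prefix.mp hp).length_le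
      simp only [pvSig, List.length_cons, List.length_nil] at this
      simp
      omega
    · rw [if_neg hp] at h
      cases hq : pvFindSig rest with
      | none => rw [hq] at h; simp at h
      | some q =>
        rw [hq] at h
        simp only [Option.map_some, Option.some.injEq] at h
        subst h
        obtain ⟨h1, h2⟩ := ih q hq
        exact ⟨by simpa using h1, by simp; omega⟩

theorem pvA0_nil : pvA0 [] = some [] := by rw [pvA0]

theorem pvB0_nil : pvB0 [] = some [] := by rw [pvB0]; rfl

theorem pvA0_noSig (cs : List Char) (h : pvFindSig cs = none) : pvA0 cs = some cs := by
  induction cs with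
  | nil => exact pvA0_nil
  | cons c rest ih =>
    rw [pvFindSig] at h
    by_cases hp : pvSig.isPrefixOf (c :: rest)
    · rw [if_pos hp] at h; simp at h
    · rw [if_neg hp] at h
      have hr : pvFindSig rest = none := by
        cases hq : pvFindSig rest
        · rfl
        · rw [hq] at h; simp at h
      rw [pvA0, if_neg hp, ih hr]
      rfl

theorem pvNotPrefix (x : Char) (xs : List Char) (hx : ('\\' == x) = false) :
    ¬ (pvSig.isPrefixOf (x :: xs) = true) := by
  simp only [pvSig, List.isPrefixOf, hx, Bool.false_and]
  simp

theorem pvA0_seven (c : Char) (rest : List Char) (hp : pvSig.isPrefixOf (c :: rest) = true)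
    (hb : ¬ (((rest.drop 6).dropWhile pvIsWs).head? = some '{')) :
    pvA0 (c :: rest) = (pvA0 ((c :: rest).drop 7)).map (fun r => pvSig ++ r) := by
  obtain ⟨t, ht⟩ := List.isPrefixOf_iff_prefix.mp hp
  simp only [pvSig] at ht
  obtain ⟨rfl, rfl⟩ : c = '\\' ∧ rest = 'i' :: 'm' :: 'a' :: 'g' :: 'e' :: 'm' :: t := by
    cases ht
    exact ⟨rfl, rfl⟩
  rw [pvA0, if_pos hp, if_neg hb]
  rw [pvA0, if_neg (pvNotPrefix 'i' _ (by decide))]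
  rw [pvA0, if_neg (pvNotPrefix 'm' _ (by decide))]
  rw [pvA0, if_neg (pvNotPrefix 'a' _ (by decide))]
  rw [pvA0, if_neg (pvNotPrefix 'g' _ (by decide))]
  rw [pvA0, if_neg (pvNotPrefix 'e' _ (by decide))]
  rw [pvA0, if_neg (pvNotPrefix 'm' _ (by decide))]
  have e7 : ('\\' :: 'i' :: 'm' :: 'a' :: 'g' :: 'e' :: 'm' :: t).drop 7 = t := rfl
  rw [e7]
  cases pvA0 t <;> simp [pvSig]

theorem pvBridge : ∀ (p : Nat) (cs : List Char), pvFindSig cs = some p →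
    pvA0 cs =
      (if ((cs.drop (p + 7)).dropWhile pvIsWs).head? = some '{' then
        match pvReadBraced ((cs.drop (p + 7)).dropWhile pvIsWs) with
        | some pr =>
          if _h : pr.2.length < cs.length then (pvA0 pr.2).map (fun r => cs.take p ++ (pvMarker ++ r))
          else none
        | none => none
      else
        if _h2 : (cs.drop (p + 7)).length < cs.length then
          (pvA0 (cs.drop (p + 7))).map (fun r => cs.take p ++ (pvSig ++ r))
        else none) := by
  intro p
  induction p with
  | zero =>
    intro cs h
    cases cs with
    | nil => simp [pvFindSig] at h
    | cons c rest =>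
      rw [pvFindSig] at h
      by_cases hp : pvSig.isPrefixOf (c :: rest)
      · simp only [Nat.zero_add, List.take_zero, List.nil_append]
        have e7 : (c :: rest).drop 7 = rest.drop 6 := rfl
        rw [e7]
        by_cases hb : ((rest.drop 6).dropWhile pvIsWs).head? = some '{'
        · rw [pvA0, if_pos hp, if_pos hb, if_pos hb]
          cases hr : pvReadBraced ((rest.drop 6).dropWhile pvIsWs) with
          | none => simp
          | some pr =>
            have hg := pvGuard rest 6 pr hr
            simp only
            rw [dif_pos (by simpa using Nat.lt_succ_of_lt hg),
                dif_pos (by simp only [List.length_cons]; omega)]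
        · rw [if_neg hb, pvA0_seven c rest hp hb, e7]
          have hlen := (pvFindSig_some (c :: rest) 0 (by rw [pvFindSig, if_pos hp])).2
          rw [dif_pos (by simp only [List.length_cons] at hlen ⊢; simp)]
      · rw [if_neg hp] at h
        cases hq : pvFindSig rest <;> rw [hq] at h <;> simp at h
  | succ p ih =>
    intro cs h
    cases cs with
    | nil => simp [pvFindSig] at h
    | cons c rest =>
      rw [pvFindSig] at h
      by_cases hp : pvSig.isPrefixOf (c :: rest)
      · rw [if_pos hp] at h; simp at h
      · rw [if_neg hp] at h
        cases hq : pvFindSig rest with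
        | none => rw [hq] at h; simp at h
        | some q =>
          rw [hq] at h
          simp only [Option.map_some, Option.some.injEq] at h
          have hqp : q = p := by omega
          rw [hqp] at hq
          have hlen := (pvFindSig_some rest p hq).2
          rw [pvA0, if_neg hp, ih rest hq]
          have ed : (c :: rest).drop (p + 1 + 7) = rest.drop (p + 7) := by
            have e : p + 1 + 7 = (p + 7) + 1 := by omega
            rw [e, List.drop_succ_cons]
          have et : (c :: rest).take (p + 1) = c :: rest.take p := List.take_succ_cons
          rw [ed, et]
          by_cases hb : ((rest.drop (p + 7)).dropWhile pvIsWs).head? = some '{'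
          · rw [if_pos hb, if_pos hb]
            cases hr : pvReadBraced ((rest.drop (p + 7)).dropWhile pvIsWs) with
            | none => simp
            | some pr =>
              have hg := pvGuard rest (p + 7) pr hr
              simp only
              rw [dif_pos hg, dif_pos (by simp only [List.length_cons]; omega)]
              cases pvA0 pr.2 <;> simp
          · rw [if_neg hb, if_neg hb]
            have hd : (rest.drop (p + 7)).length = rest.length - (p + 7) := by simp
            rw [dif_pos (by omega), dif_pos (by simp only [List.length_cons]; simp)]
            cases pvA0 (rest.drop (p + 7)) <;> simp

theorem pvA0_eq_pvB0 (cs : List Char) : pvA0 cs = pvB0 cs := by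
  suffices h : ∀ (n : Nat) (cs : List Char), cs.length ≤ n → pvA0 cs = pvB0 cs from
    h cs.length cs le_rfl
  intro n
  induction n with
  | zero =>
    intro cs hl
    cases cs with
    | nil => rw [pvA0_nil, pvB0_nil]
    | cons c rest => simp at hl
  | succ n ih =>
    intro cs hl
    rw [pvB0]
    split
    · rename_i heq
      exact pvA0_noSig cs heq
    · rename_i p heq
      have hfp := (pvFindSig_some cs p heq).2
      rw [pvBridge p cs heq]
      by_cases hb : ((cs.drop (p + 7)).dropWhile pvIsWs).head? = some '{'
      · rw [if_pos hb, if_pos hb]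
        rw [pvReadGroup_eq]
        cases hr : pvReadBraced ((cs.drop (p + 7)).dropWhile pvIsWs) with
        | none => simp
        | some pr =>
          have hg := pvGuard cs (p + 7) pr hr
          simp only
          rw [dif_pos hg, dif_pos hg, ih pr.2 (by omega)]
      · rw [if_neg hb, if_neg hb]
        have hd : (cs.drop (p + 7)).length = cs.length - (p + 7) := by simp
        rw [dif_pos (by omega), dif_pos (by omega), ih (cs.drop (p + 7)) (by omega)]

-- ===== VERDICT (by name: the statement is the Claim_ definition above) =====
theorem process_macro_imagem_py_spec : Claim_equal_process_macro_imagem_py := by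
  intro text imagens _ _
  unfold Spec_process_macro_imagem_py process_macro_imagem_py process_macro_imagem_py_alt
  rw [pvA0_eq_pvB0]
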